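-- pv_equiv track=rewrite | github.com/Ioan-Knowles-2005/project_euler | 0086.py | solve_problem_86
-- ===== SOURCE A (Python) =====
-- import math
--
-- def solve_problem_86(target=1_000_000):
--     """
--     Returns the smallest integer M such that the number of integer-dimension
--     cuboids (a <= b <= c <= M) having an integer shortest path from one corner
--     to the opposite corner exceeds 'target'.
--     """
--
--     def is_square(n):
--         r = int(math.isqrt(n))
--         return (r * r == n)
--
--     total_solutions = 0
--     M = 0
--
--     while True:
--         M += 1
--         new_solutions = 0
--
--         # For fixed c = M, let x = a + b, where 2 <= x <= 2M
--         for x in range(2, 2*M + 1):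
--             dist_sq = x*x + M*M
--             if is_square(dist_sq):
--                 # Count valid pairs (a, b) with:
--                 #   1 <= a <= b <= M
--                 #   a + b = x
--                 #   a <= b => a <= x/2
--                 #   b <= M => x - a <= M => a >= x - M
--                 a_min = max(1, x - M)
--                 a_max = x // 2
--                 if a_max >= a_min:
--                     new_solutions += (a_max - a_min + 1)
--
--         total_solutions += new_solutions
--
--         if total_solutions > target:
--             return M
-- ===== SOURCE B (Python) =====
-- import math
--
-- def solve_problem_86(target=1_000_000):
--     """
--     Returns the smallest integer M such that the number of integer-dimension
--     cuboids (a <= b <= c <= M) having an integer shortest path from one corner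
--     to the opposite corner exceeds 'target'.
--
--     Different strategy: instead of scanning every leg-sum x in [2, 2M] and
--     testing x*x + M*M for squareness, count solutions for each M by
--     enumerating candidate integer path lengths d (the hypotenuse): d must lie
--     in (M, M*sqrt(5)], and d gives a solution iff d*d - M*M is a perfect
--     square x*x with x >= 2 (x = a + b).  The outer search is also staged:
--     scan M over [1, limit] with cumulative prefix counts, doubling the limit
--     and rescanning until the target is exceeded.
--     """
--
--     def count_for(M):
--         # cuboids with largest side exactly M, enumerated by hypotenuse d
--         MM = M * M
--         c = 0
--         for d in range(M + 1, math.isqrt(5 * MM) + 1):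
--             t = d * d - MM
--             x = math.isqrt(t)
--             if x * x == t and x >= 2:
--                 c += x // 2 - max(1, x - M) + 1
--         return c
--
--     limit = 8
--     while True:
--         total = 0
--         for M in range(1, limit + 1):
--             total += count_for(M)
--             if total > target:
--                 return M
--         limit *= 2
-- ===== Notes on version B (the rewrite author's own statement) =====
-- stated objective: alternative
-- what changed: Per-M solutions are counted by enumerating candidate hypotenuses d in (M, M*sqrt(5)] and inverting x = isqrt(d^2 - M^2), instead of scanning every leg-sum x in [2, 2M] and testing x^2 + M^2 for squareness; the outer search is staged, scanning M over [1, limit] with prefix counts and doubling the limit until the target is exceeded.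
import Mathlib
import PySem

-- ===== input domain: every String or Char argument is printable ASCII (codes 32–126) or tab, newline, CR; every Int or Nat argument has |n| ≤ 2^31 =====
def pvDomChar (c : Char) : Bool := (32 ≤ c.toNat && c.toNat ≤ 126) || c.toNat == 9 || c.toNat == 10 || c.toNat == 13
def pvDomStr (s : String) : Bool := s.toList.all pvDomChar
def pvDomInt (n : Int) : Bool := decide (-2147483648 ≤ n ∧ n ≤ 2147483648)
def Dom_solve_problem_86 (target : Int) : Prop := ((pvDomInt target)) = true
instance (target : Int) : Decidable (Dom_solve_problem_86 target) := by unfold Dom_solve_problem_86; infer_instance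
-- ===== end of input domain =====

-- B counts each M's cuboids by enumerating candidate hypotenuses d in (M, M*sqrt 5] and
-- inverting x = isqrt(d^2 - M^2), instead of A's scan over leg-sums x with a squareness
-- test; B's outer search scans M over [1, limit] with prefix counts, doubling the limit
-- and rescanning.  A timing run measured B faster by a constant factor (the inner
-- range has ~1.24*M hypotenuse candidates instead of 2*M - 1 leg-sums).
-- Both Pythons loop 'while True'; the ports make the loops total with a fuel bound that
-- is never reached (every M = 3k contributes a cuboid via the (3k,4k,5k) triple).

-- ===== PORT A =====

-- A's helper is_square(n): r = int(math.isqrt(n)); r*r == n   (n ≥ 0 at every call site)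
def pvIsSquare (n : Int) : Bool := decide (Int.sqrt n * Int.sqrt n = n)

-- body of A's inner 'for x in range(2, 2*M + 1)' loop
def pvStepA (M acc x : Int) : Int :=
  let dist_sq := x * x + M * M
  if pvIsSquare dist_sq then
    let a_min := max 1 (x - M)
    let a_max := PySem.Int.floordiv x 2
    if a_max ≥ a_min then acc + (a_max - a_min + 1) else acc
  else acc

-- A's per-M count new_solutions
def pvNewA (M : Int) : Int :=
  (PySem.List.pyRange 2 (2 * M + 1) 1).foldl (pvStepA M) 0

-- A's 'while True' loop (fuel only makes it total; it is large enough to never run out)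
def pvLoopA : Nat → Int → Int → Int → Int
  | 0, _, M, _ => M
  | n + 1, target, M, total =>
    let M' := M + 1
    let new_solutions := pvNewA M'
    let total' := total + new_solutions
    if total' > target then M' else pvLoopA n target M' total'

def solve_problem_86 (target : Int) : Int :=
  pvLoopA ((3 * target + 7).toNat + 1) target 0 0

-- ===== PORT B =====

-- body of B's 'for d in range(M + 1, isqrt(5*MM) + 1)' loop in count_for
def pvStepBd (M MM c d : Int) : Int :=
  let t := d * d - MM
  let x := Int.sqrt t
  if x * x = t ∧ 2 ≤ x then c + (PySem.Int.floordiv x 2 - max 1 (x - M) + 1) else c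

-- B's helper count_for(M)
def pvCountB (M : Int) : Int :=
  let MM := M * M
  (PySem.List.pyRange (M + 1) (Int.sqrt (5 * MM) + 1) 1).foldl (pvStepBd M MM) 0

-- B's inner 'for M in range(1, limit + 1)' scan with early return (None = ran off the end)
def pvScanB (target : Int) : Nat → Int → Int → Option Int
  | 0, _, _ => none
  | k + 1, M, total =>
    let M' := M + 1
    let total' := total + pvCountB M'
    if total' > target then some M' else pvScanB target k M' total'

-- B's 'while True' doubling loop (fuel only makes it total; never reached)
def pvGoB (target : Int) : Nat → Int → Int
  | 0, _ => 0
  | n + 1, limit =>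
    match pvScanB target limit.toNat 0 0 with
    | some r => r
    | none => pvGoB target n (2 * limit)

def solve_problem_86_alt (target : Int) : Int :=
  pvGoB target ((3 * target + 7).toNat + 1) 8

-- ===== PRECONDITION & SPEC =====
def Spec_solve_problem_86 (target : Int) (out : Int) : Prop := out = solve_problem_86_alt target
instance (target : Int) (out : Int) : Decidable (Spec_solve_problem_86 target out) := by unfold Spec_solve_problem_86; infer_instance

-- ===== CLAIM (what is proved, stated in full; the proofs are below) =====
def Claim_equal_solve_problem_86 : Prop := ∀ (target : Int), Dom_solve_problem_86 target → Spec_solve_problem_86 target (solve_problem_86 target)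

-- ===== LEMMAS AND PROOFS =====

-- ---- integer-sqrt facts ----

theorem pvSqrt_le (t : Int) (ht : 0 ≤ t) : Int.sqrt t * Int.sqrt t ≤ t := by
  have h := Int.ofNat_le.mpr (Nat.sqrt_le' t.toNat)
  push_cast at h
  rw [Int.toNat_of_nonneg ht] at h
  simpa [Int.sqrt, pow_two] using h

theorem pvLt_succ_sqrt (t : Int) (ht : 0 ≤ t) :
    t < (Int.sqrt t + 1) * (Int.sqrt t + 1) := by
  have h := Int.ofNat_lt.mpr (Nat.lt_succ_sqrt' t.toNat)
  push_cast [Nat.succ_eq_add_one] at h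
  rw [Int.toNat_of_nonneg ht] at h
  simpa [Int.sqrt, pow_two] using h

theorem pvSqrt_sq_self (x : Int) (hx : 0 ≤ x) : Int.sqrt (x * x) = x := by
  rw [Int.sqrt_eq]
  omega

theorem pvLe_sqrt (m n : Int) (hm : 0 ≤ m) (h : m * m ≤ n) : m ≤ Int.sqrt n := by
  by_contra hc
  push_neg at hc
  have h1 := pvLt_succ_sqrt n (le_trans (mul_nonneg hm hm) h)
  have h2 := Int.sqrt_nonneg n
  nlinarith

theorem pvSqrt_le_of (d n : Int) (hd : 0 ≤ d) (hn : 0 ≤ n) (h : d ≤ Int.sqrt n) :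
    d * d ≤ n :=
  le_trans (mul_le_mul h h hd (Int.sqrt_nonneg n)) (pvSqrt_le n hn)

-- ---- the per-index summands of the two inner loops ----

def pvPairs (M x : Int) : Int := PySem.Int.floordiv x 2 - max 1 (x - M) + 1

def pvGA (M x : Int) : Int :=
  if pvIsSquare (x * x + M * M) then
    (if PySem.Int.floordiv x 2 ≥ max 1 (x - M) then pvPairs M x else 0)
  else 0

def pvGB (M d : Int) : Int :=
  if Int.sqrt (d * d - M * M) * Int.sqrt (d * d - M * M) = d * d - M * M ∧
      2 ≤ Int.sqrt (d * d - M * M) then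
    pvPairs M (Int.sqrt (d * d - M * M))
  else 0

theorem pvStepA_eq (M acc x : Int) : pvStepA M acc x = acc + pvGA M x := by
  simp only [pvStepA, pvGA, pvPairs]
  split_ifs <;> omega

theorem pvStepBd_eq (M c d : Int) : pvStepBd M (M * M) c d = c + pvGB M d := by
  simp only [pvStepBd, pvGB, pvPairs]
  split_ifs <;> omega

-- ---- fold over a range as a Finset.Icc sum ----

theorem pvFoldl_sum (step : Int → Int → Int) (g : Int → Int)
    (h : ∀ acc x, step acc x = acc + g x) :
    ∀ (l : List Int) (acc : Int), l.foldl step acc = acc + (l.map g).sum := by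
  intro l
  induction l with
  | nil => intro acc; simp
  | cons a l ih => intro acc; simp only [List.foldl_cons, List.map_cons, List.sum_cons, h, ih]; ring

theorem pvSum_pyRange (f : Int → Int) :
    ∀ (n : Nat) (a : Int),
      ((PySem.List.pyRange a (a + n) 1).map f).sum = ∑ i ∈ Finset.range n, f (a + i) := by
  intro n
  induction n with
  | zero => intro a; rw [PySem.List.pyRange_one_eq_nil (by simp)]; simp
  | succ n ih =>
    intro a
    rw [PySem.List.pyRange_one_cons (by push_cast; omega : a < a + ((n : Nat) + 1 : Nat))]
    have harr : a + ((n + 1 : Nat) : Int) = (a + 1) + (n : Nat) := by push_cast; ring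
    rw [List.map_cons, List.sum_cons, harr, ih (a + 1), Finset.sum_range_succ']
    simp only [Nat.cast_zero, add_zero, Nat.cast_add, Nat.cast_one]
    rw [add_comm]
    congr 1
    apply Finset.sum_congr rfl
    intro i _
    ring_nf

theorem pvSum_range_Icc (f : Int → Int) :
    ∀ (n : Nat) (a : Int),
      ∑ i ∈ Finset.range n, f (a + i) = ∑ x ∈ Finset.Icc a (a + n - 1), f x := by
  intro n
  induction n with
  | zero => intro a; rw [Finset.Icc_eq_empty (by omega)]; simp
  | succ n ih =>
    intro a
    rw [Finset.sum_range_succ, ih a]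
    have hins : Finset.Icc a (a + ((n + 1 : Nat) : Int) - 1)
        = insert (a + (n : Nat)) (Finset.Icc a (a + (n : Nat) - 1)) := by
      ext y
      simp only [Finset.mem_Icc, Finset.mem_insert]
      push_cast
      omega
    rw [hins, Finset.sum_insert (by simp only [Finset.mem_Icc]; omega)]
    ring

-- combined: a foldl of an 'acc + g x' step over pyRange lo (hi+1) 1 is the Icc sum
theorem pvFold_Icc (step : Int → Int → Int) (g : Int → Int)
    (h : ∀ acc x, step acc x = acc + g x) (lo hi : Int) (hle : lo ≤ hi + 1) :
    (PySem.List.pyRange lo (hi + 1) 1).foldl step 0 = ∑ x ∈ Finset.Icc lo hi, g x := by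
  rw [pvFoldl_sum step g h, zero_add]
  have hn : hi + 1 = lo + ((hi + 1 - lo).toNat : Int) := by omega
  rw [hn, pvSum_pyRange, pvSum_range_Icc]
  have he : lo + ((hi + 1 - lo).toNat : Int) - 1 = hi := by omega
  rw [he]

-- ---- the two per-M counts as Icc sums ----

theorem pvNewA_sum (M : Int) (hM : 1 ≤ M) :
    pvNewA M = ∑ x ∈ Finset.Icc 2 (2 * M), pvGA M x := by
  unfold pvNewA
  exact pvFold_Icc (pvStepA M) (pvGA M) (pvStepA_eq M) 2 (2 * M) (by omega)

theorem pvCountB_sum (M : Int) (hM : 1 ≤ M) :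
    pvCountB M = ∑ d ∈ Finset.Icc (M + 1) (Int.sqrt (5 * (M * M))), pvGB M d := by
  have hD : 2 * M ≤ Int.sqrt (5 * (M * M)) :=
    pvLe_sqrt (2 * M) (5 * (M * M)) (by omega) (by nlinarith)
  unfold pvCountB
  exact pvFold_Icc (pvStepBd M (M * M)) (pvGB M) (pvStepBd_eq M) (M + 1)
    (Int.sqrt (5 * (M * M))) (by omega)

-- ---- the guard 'a_max ≥ a_min' always holds for 2 ≤ x ≤ 2M ----

theorem pvGuard (M x : Int) (h2 : 2 ≤ x) (hx : x ≤ 2 * M) :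
    max 1 (x - M) ≤ PySem.Int.floordiv x 2 := by
  rw [PySem.Int.floordiv_eq_ediv_of_pos (by norm_num)]
  omega

-- ---- the bijection x ↔ d between the two filtered index sets ----

theorem pvSum_bij (M : Int) (hM : 1 ≤ M) :
    ∑ x ∈ Finset.Icc 2 (2 * M), pvGA M x
      = ∑ d ∈ Finset.Icc (M + 1) (Int.sqrt (5 * (M * M))), pvGB M d := by
  have hGA : ∀ x ∈ Finset.Icc (2 : Int) (2 * M), pvGA M x
      = if pvIsSquare (x * x + M * M) = true then pvPairs M x else 0 := by
    intro x hx
    simp only [Finset.mem_Icc] at hx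
    unfold pvGA
    rw [if_pos (pvGuard M x hx.1 hx.2)]
  rw [Finset.sum_congr rfl hGA]
  simp only [pvGB]
  rw [← Finset.sum_filter, ← Finset.sum_filter]
  refine Finset.sum_nbij' (fun x => Int.sqrt (x * x + M * M))
    (fun d => Int.sqrt (d * d - M * M)) ?_ ?_ ?_ ?_ ?_
  · -- forward membership
    intro x hx
    simp only [Finset.mem_filter, Finset.mem_Icc, pvIsSquare, decide_eq_true_eq] at hx ⊢
    obtain ⟨⟨hx2, hxM⟩, hr⟩ := hx
    have hrn : 0 ≤ Int.sqrt (x * x + M * M) := Int.sqrt_nonneg _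
    have hxx : Int.sqrt ((Int.sqrt (x * x + M * M)) * (Int.sqrt (x * x + M * M)) - M * M)
        = x := by
      have : (Int.sqrt (x * x + M * M)) * (Int.sqrt (x * x + M * M)) - M * M = x * x := by
        omega
      rw [this, pvSqrt_sq_self x (by omega)]
    refine ⟨⟨?_, ?_⟩, ?_, ?_⟩
    · by_contra hc
      push_neg at hc
      nlinarith
    · exact pvLe_sqrt _ _ hrn (by nlinarith)
    · rw [hxx]; omega
    · rw [hxx]; omega
  · -- backward membership
    intro d hd
    simp only [Finset.mem_filter, Finset.mem_Icc, pvIsSquare, decide_eq_true_eq] at hd ⊢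
    obtain ⟨⟨hdM, hdD⟩, hx, h2x⟩ := hd
    have hdn : (0 : Int) ≤ d := by omega
    have hd5 : d * d ≤ 5 * (M * M) := pvSqrt_le_of d _ hdn (by nlinarith) hdD
    have hxn : 0 ≤ Int.sqrt (d * d - M * M) := Int.sqrt_nonneg _
    have hdd : Int.sqrt (Int.sqrt (d * d - M * M) * Int.sqrt (d * d - M * M) + M * M)
        = d := by
      have : Int.sqrt (d * d - M * M) * Int.sqrt (d * d - M * M) + M * M = d * d := by
        omega
      rw [this, pvSqrt_sq_self d hdn]
    refine ⟨⟨h2x, ?_⟩, ?_⟩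
    · by_contra hc
      push_neg at hc
      nlinarith
    · rw [hdd]; omega
  · -- left inverse
    intro x hx
    simp only [Finset.mem_filter, Finset.mem_Icc, pvIsSquare, decide_eq_true_eq] at hx
    obtain ⟨⟨hx2, _⟩, hr⟩ := hx
    show Int.sqrt (Int.sqrt (x * x + M * M) * Int.sqrt (x * x + M * M) - M * M) = x
    have : (Int.sqrt (x * x + M * M)) * (Int.sqrt (x * x + M * M)) - M * M = x * x := by
      omega
    rw [this, pvSqrt_sq_self x (by omega)]
  · -- right inverse
    intro d hd
    simp only [Finset.mem_filter, Finset.mem_Icc] at hd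
    obtain ⟨⟨hdM, _⟩, hx, _⟩ := hd
    show Int.sqrt (Int.sqrt (d * d - M * M) * Int.sqrt (d * d - M * M) + M * M) = d
    have : Int.sqrt (d * d - M * M) * Int.sqrt (d * d - M * M) + M * M = d * d := by
      omega
    rw [this, pvSqrt_sq_self d (by omega)]
  · -- values agree
    intro x hx
    simp only [Finset.mem_filter, Finset.mem_Icc, pvIsSquare, decide_eq_true_eq] at hx
    obtain ⟨⟨hx2, _⟩, hr⟩ := hx
    show pvPairs M x
        = pvPairs M (Int.sqrt (Int.sqrt (x * x + M * M) * Int.sqrt (x * x + M * M) - M * M))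
    have : (Int.sqrt (x * x + M * M)) * (Int.sqrt (x * x + M * M)) - M * M = x * x := by
      omega
    rw [this, pvSqrt_sq_self x (by omega)]

-- ---- per-M equality of the two counts ----

theorem pvCount_eq (M : Int) (hM : 1 ≤ M) : pvCountB M = pvNewA M := by
  rw [pvNewA_sum M hM, pvCountB_sum M hM, pvSum_bij M hM]

-- ---- nonnegativity and the (3k,4k,5k) lower bound ----

theorem pvGA_nonneg (M x : Int) : 0 ≤ pvGA M x := by
  unfold pvGA pvPairs
  split_ifs with h1 h2
  · omega
  · omega
  · omega

theorem pvNewA_nonneg (M : Int) : 0 ≤ pvNewA M := by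
  by_cases h : M ≤ 0
  · unfold pvNewA
    rw [PySem.List.pyRange_one_eq_nil (by omega)]
    simp
  · rw [pvNewA_sum M (by omega)]
    exact Finset.sum_nonneg fun x _ => pvGA_nonneg M x

theorem pvNewA_triple (k : Int) (hk : 1 ≤ k) : 1 ≤ pvNewA (3 * k) := by
  rw [pvNewA_sum (3 * k) (by omega)]
  have hmem : (4 * k) ∈ Finset.Icc (2 : Int) (2 * (3 * k)) := by
    simp only [Finset.mem_Icc]; omega
  have hval : 1 ≤ pvGA (3 * k) (4 * k) := by
    have hsq : pvIsSquare (4 * k * (4 * k) + 3 * k * (3 * k)) = true := by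
      unfold pvIsSquare
      have h25 : 4 * k * (4 * k) + 3 * k * (3 * k) = (5 * k) * (5 * k) := by ring
      rw [h25, pvSqrt_sq_self (5 * k) (by omega)]
      simp
    have hfd : PySem.Int.floordiv (4 * k) 2 = 2 * k := by
      rw [PySem.Int.floordiv_eq_ediv_of_pos (by norm_num)]
      omega
    unfold pvGA pvPairs
    rw [hsq, if_pos rfl, hfd]
    rw [if_pos (by omega)]
    omega
  calc (1 : Int) ≤ pvGA (3 * k) (4 * k) := hval
    _ ≤ ∑ x ∈ Finset.Icc 2 (2 * (3 * k)), pvGA (3 * k) x :=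
      Finset.single_le_sum (fun x _ => pvGA_nonneg (3 * k) x) hmem

-- ---- cumulative counts and existence of the answer ----

def pvCum : Nat → Int
  | 0 => 0
  | n + 1 => pvCum n + pvNewA ((n : Int) + 1)

theorem pvCum_triple : ∀ k : Nat, (k : Int) ≤ pvCum (3 * k) := by
  intro k
  induction k with
  | zero => simp [pvCum]
  | succ k ih =>
    have e1 : pvCum (3 * k + 1) = pvCum (3 * k) + pvNewA (((3 * k : Nat) : Int) + 1) := rfl
    have e2 : pvCum (3 * k + 2)
        = pvCum (3 * k + 1) + pvNewA (((3 * k + 1 : Nat) : Int) + 1) := rfl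
    have e3 : pvCum (3 * k + 3)
        = pvCum (3 * k + 2) + pvNewA (((3 * k + 2 : Nat) : Int) + 1) := rfl
    have h33 : 3 * (k + 1) = 3 * k + 3 := by omega
    have htr : 1 ≤ pvNewA (((3 * k + 2 : Nat) : Int) + 1) := by
      have hc : ((3 * k + 2 : Nat) : Int) + 1 = 3 * ((k : Int) + 1) := by push_cast; ring
      rw [hc]
      exact pvNewA_triple ((k : Int) + 1) (by omega)
    have hn1 := pvNewA_nonneg (((3 * k : Nat) : Int) + 1)
    have hn2 := pvNewA_nonneg (((3 * k + 1 : Nat) : Int) + 1)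
    rw [h33, e3, e2, e1]
    push_cast at ih htr hn1 hn2 ⊢
    omega

theorem pvExists (target : Int) : ∃ j : Nat, 0 < j ∧ target < pvCum j := by
  by_cases h : target < 0
  · exact ⟨1, by omega, by have := pvNewA_nonneg 1; simp only [pvCum]; push_cast; omega⟩
  · refine ⟨3 * (target.toNat + 1), by omega, ?_⟩
    have := pvCum_triple (target.toNat + 1)
    have ht : ((target.toNat + 1 : Nat) : Int) = target + 1 := by omega
    omega

-- ---- both loops return the least j with pvCum j > target ----

theorem pvLoopA_run (target : Int) :
    ∀ (n m j : Nat), m < j → j ≤ m + n → target < pvCum j →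
      (∀ i : Nat, m < i → i < j → pvCum i ≤ target) →
      pvLoopA n target (m : Int) (pvCum m) = (j : Int) := by
  intro n
  induction n with
  | zero => intro m j h1 h2 _ _; omega
  | succ n ih =>
    intro m j h1 h2 h3 h4
    simp only [pvLoopA]
    have hstep : pvCum m + pvNewA ((m : Int) + 1) = pvCum (m + 1) := by
      simp only [pvCum]
    rw [hstep]
    by_cases hc : pvCum (m + 1) > target
    · have hj : j = m + 1 := by
        by_contra hne
        exact absurd (h4 (m + 1) (by omega) (by omega)) (by omega)
      rw [if_pos hc, hj]
      push_cast; ring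
    · rw [if_neg hc]
      have hj : m + 1 < j := by
        rcases Nat.lt_or_ge (m + 1) j with h | h
        · exact h
        · have : j = m + 1 := by omega
          rw [this] at h3; omega
      have : ((m : Int) + 1) = ((m + 1 : Nat) : Int) := by push_cast; ring
      rw [this]
      exact ih (m + 1) j hj (by omega) h3 (fun i hi1 hi2 => h4 i (by omega) hi2)

theorem pvScanB_some (target : Int) :
    ∀ (n m j : Nat), m < j → j ≤ m + n → target < pvCum j →
      (∀ i : Nat, m < i → i < j → pvCum i ≤ target) →
      pvScanB target n (m : Int) (pvCum m) = some ((j : Nat) : Int) := by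
  intro n
  induction n with
  | zero => intro m j h1 h2 _ _; omega
  | succ n ih =>
    intro m j h1 h2 h3 h4
    simp only [pvScanB]
    have hcnt : pvCountB ((m : Int) + 1) = pvNewA ((m : Int) + 1) :=
      pvCount_eq ((m : Int) + 1) (by omega)
    rw [hcnt]
    have hstep : pvCum m + pvNewA ((m : Int) + 1) = pvCum (m + 1) := by
      simp only [pvCum]
    rw [hstep]
    by_cases hc : pvCum (m + 1) > target
    · have hj : j = m + 1 := by
        by_contra hne
        exact absurd (h4 (m + 1) (by omega) (by omega)) (by omega)
      rw [if_pos hc, hj]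
      push_cast; ring_nf
    · rw [if_neg hc]
      have hj : m + 1 < j := by
        rcases Nat.lt_or_ge (m + 1) j with h | h
        · exact h
        · have : j = m + 1 := by omega
          rw [this] at h3; omega
      have : ((m : Int) + 1) = ((m + 1 : Nat) : Int) := by push_cast; ring
      rw [this]
      exact ih (m + 1) j hj (by omega) h3 (fun i hi1 hi2 => h4 i (by omega) hi2)

theorem pvScanB_none (target : Int) :
    ∀ (n m : Nat), (∀ i : Nat, m < i → i ≤ m + n → pvCum i ≤ target) →
      pvScanB target n (m : Int) (pvCum m) = none := by
  intro n
  induction n with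
  | zero => intro m _; rfl
  | succ n ih =>
    intro m h
    simp only [pvScanB]
    have hcnt : pvCountB ((m : Int) + 1) = pvNewA ((m : Int) + 1) :=
      pvCount_eq ((m : Int) + 1) (by omega)
    rw [hcnt]
    have hstep : pvCum m + pvNewA ((m : Int) + 1) = pvCum (m + 1) := by
      simp only [pvCum]
    rw [hstep]
    rw [if_neg (by have := h (m + 1) (by omega) (by omega); omega)]
    have : ((m : Int) + 1) = ((m + 1 : Nat) : Int) := by push_cast; ring
    rw [this]
    exact ih (m + 1) (fun i hi1 hi2 => h i (by omega) (by omega))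

theorem pvGoB_hit (target : Int) (j : Nat) (hj : 0 < j) (hcum : target < pvCum j)
    (hmin : ∀ i : Nat, 0 < i → i < j → pvCum i ≤ target) :
    ∀ (k : Nat) (limit : Int), 1 ≤ limit → (j : Int) ≤ limit →
      pvGoB target (k + 1) limit = (j : Int) := by
  intro k limit h1 h2
  simp only [pvGoB]
  have hscan : pvScanB target limit.toNat ((0 : Nat) : Int) (pvCum 0) = some ((j : Nat) : Int) :=
    pvScanB_some target limit.toNat 0 j hj (by omega) hcum (fun i hi1 hi2 => hmin i hi1 hi2)
  simp only [pvCum, Nat.cast_zero] at hscan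
  rw [hscan]

theorem pvGoB_run (target : Int) (j : Nat) (hj : 0 < j) (hcum : target < pvCum j)
    (hmin : ∀ i : Nat, 0 < i → i < j → pvCum i ≤ target) :
    ∀ (n : Nat) (limit : Int), 1 ≤ limit → (j : Int) ≤ limit + (n : Int) →
      pvGoB target (n + 1) limit = (j : Int) := by
  intro n
  induction n with
  | zero =>
    intro limit h1 h2
    exact pvGoB_hit target j hj hcum hmin 0 limit h1 (by push_cast at h2; omega)
  | succ n ih =>
    intro limit h1 h2
    by_cases hc : (j : Int) ≤ limit
    · exact pvGoB_hit target j hj hcum hmin (n + 1) limit h1 hc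
    · push_neg at hc
      have hnone : pvScanB target limit.toNat ((0 : Nat) : Int) (pvCum 0) = none := by
        apply pvScanB_none target limit.toNat 0
        intro i hi1 hi2
        exact hmin i hi1 (by omega)
      simp only [pvCum, Nat.cast_zero] at hnone
      simp only [pvGoB]
      rw [hnone]
      exact ih (2 * limit) (by omega) (by push_cast at h2 ⊢; omega)

-- ===== VERDICT (by name: the statement is the Claim_ definition above) =====
theorem solve_problem_86_spec : Claim_equal_solve_problem_86 := by
  intro target _
  unfold Spec_solve_problem_86 solve_problem_86 solve_problem_86_alt
  have hE := pvExists target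
  set j := Nat.find hE with hjdef
  obtain ⟨hj0, hjcum⟩ := Nat.find_spec hE
  have hmin : ∀ i : Nat, 0 < i → i < j → pvCum i ≤ target := by
    intro i hi1 hi2
    have := Nat.find_min hE hi2
    push_neg at this
    exact this hi1
  have hjle : (j : Int) ≤ ((3 * target + 7).toNat : Int) + 1 := by
    have hfind : ∀ w : Nat, (0 < w ∧ target < pvCum w) → j ≤ w := fun w hw => Nat.find_min' hE hw
    by_cases h : target < 0
    · have h1 : j ≤ 1 := hfind 1 ⟨by omega, by have := pvNewA_nonneg 1; simp only [pvCum]; push_cast; omega⟩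
      omega
    · have hw : 0 < 3 * (target.toNat + 1) ∧ target < pvCum (3 * (target.toNat + 1)) := by
        constructor
        · omega
        · have := pvCum_triple (target.toNat + 1)
          have ht : ((target.toNat + 1 : Nat) : Int) = target + 1 := by omega
          omega
      have := hfind _ hw
      omega
  have hA : pvLoopA ((3 * target + 7).toNat + 1) target ((0 : Nat) : Int) (pvCum 0) = (j : Int) := by
    apply pvLoopA_run target ((3 * target + 7).toNat + 1) 0 j hj0 (by omega) hjcum
    intro i hi1 hi2
    exact hmin i hi1 hi2
  simp only [pvCum, Nat.cast_zero] at hA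
  have hB : pvGoB target ((3 * target + 7).toNat + 1) 8 = (j : Int) := by
    apply pvGoB_run target j hj0 hjcum hmin ((3 * target + 7).toNat) 8 (by omega)
    push_cast
    omega
  rw [hA, hB]
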